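-- pv_equiv track=rewrite | github.com/Lucas-t-rex/Chatbot | main.py | get_last_messages_summary
-- ===== SOURCE A (Python) =====
-- def get_last_messages_summary(history, max_messages=4):
--     clean_history = []
--
--     for message in history:
--         role = "Cliente" if message.get('role') == 'user' else "Bot"
--         text = message.get('text', '').strip()
--
--         if role == "Cliente" and text.startswith("A data e hora atuais são:"):
--             continue
--         if role == "Bot" and text.startswith("Entendido. A Regra de Ouro"):
--             continue
--
--         if role == "Bot" and text.startswith("Chamando função:"):
--             continue
--         if role == "Bot" and text.startswith("[HUMAN_INTERVENTION]"):
--             continue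
--
--         clean_history.append(f"*{role}:* {text}")
--
--     relevant_summary = clean_history[-max_messages:]
--
--     if not relevant_summary:
--         user_messages = [msg.get('text') for msg in history if msg.get('role') == 'user' and not msg.get('text', '').startswith("A data e hora atuais são:")]
--         if user_messages:
--             return f"*Cliente:* {user_messages[-1]}"
--         else:
--             return "Nenhum histórico de conversa encontrado."
--
--     return "\n".join(relevant_summary)
-- ===== SOURCE B (Python) =====
-- def get_last_messages_summary(history, max_messages=4):
--     picked = []
--     for message in reversed(history):
--         role = "Cliente" if message.get('role') == 'user' else "Bot"
--         text = message.get('text', '').strip()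
--         if role == "Cliente":
--             drop = text.startswith("A data e hora atuais são:")
--         else:
--             drop = text.startswith(("Entendido. A Regra de Ouro",
--                                     "Chamando função:",
--                                     "[HUMAN_INTERVENTION]"))
--         if drop:
--             continue
--         picked.append(f"*{role}:* {text}")
--         if len(picked) == max_messages:
--             break
--
--     if picked:
--         picked.reverse()
--         return "\n".join(picked)
--
--     for message in reversed(history):
--         if message.get('role') == 'user' and not message.get('text', '').startswith("A data e hora atuais são:"):
--             return f"*Cliente:* {message.get('text')}"
--     return "Nenhum histórico de conversa encontrado."
-- ===== Notes on version B (the rewrite author's own statement) =====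
-- stated objective: alternative
-- what changed: B replaces A's build-the-whole-filtered-list-then-slice strategy with a single backward pass that appends kept formatted lines and breaks as soon as max_messages lines are collected (reversing before joining), and replaces the fallback list comprehension plus [-1] indexing with a backward early-return scan; Pre_ excludes negative max_messages, a limit no caller would pass, on which A's slice clean_history[-max_messages:] flips into a positive index dropping the oldest kept messages while B naturally treats it as no limit — neither value is canonical there.
-- outside the precondition, e.g. on get_last_messages_summary([{}, {'': ''}], -1): A returns '*Bot:* ', B returns '*Bot:* \n*Bot:* '
import Mathlib
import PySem

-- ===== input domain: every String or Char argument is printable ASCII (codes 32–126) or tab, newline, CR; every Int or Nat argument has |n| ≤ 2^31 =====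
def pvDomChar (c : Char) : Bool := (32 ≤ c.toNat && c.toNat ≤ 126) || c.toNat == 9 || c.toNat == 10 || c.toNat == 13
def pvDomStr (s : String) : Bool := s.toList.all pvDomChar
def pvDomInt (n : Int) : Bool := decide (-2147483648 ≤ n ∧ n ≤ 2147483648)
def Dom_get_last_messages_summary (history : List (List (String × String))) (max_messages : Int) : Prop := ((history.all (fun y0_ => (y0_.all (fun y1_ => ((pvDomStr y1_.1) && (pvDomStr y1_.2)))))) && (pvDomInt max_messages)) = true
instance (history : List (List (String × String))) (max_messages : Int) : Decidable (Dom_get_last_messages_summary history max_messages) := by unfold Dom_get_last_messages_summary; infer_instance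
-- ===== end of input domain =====

-- B replaces A's build-full-list-then-slice strategy by a single reverse pass that stops as soon
-- as max_messages kept lines are collected (and a reverse early-return fallback scan); on
-- negative max_messages (excluded by Pre_ below) B returns all kept messages.

-- ===== PORT A =====
def get_last_messages_summary (history : List (List (String × String))) (max_messages : Int) : String :=
  let clean_history := history.foldl (fun (acc : List String) (message : List (String × String)) =>
    let d := PySem.Dict.ofList message
    let role := if d.get? "role" == some "user" then "Cliente" else "Bot"
    let text := PySem.Str.strip (d.getD "text" "")
    if role == "Cliente" && PySem.Str.startswith text "A data e hora atuais são:" then acc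
    else if role == "Bot" && PySem.Str.startswith text "Entendido. A Regra de Ouro" then acc
    else if role == "Bot" && PySem.Str.startswith text "Chamando função:" then acc
    else if role == "Bot" && PySem.Str.startswith text "[HUMAN_INTERVENTION]" then acc
    else acc ++ ["*" ++ role ++ ":* " ++ text]) []
  let relevant_summary := PySem.List.slice clean_history (some (-max_messages)) none
  if relevant_summary.isEmpty then
    let user_messages := history.foldl (fun (acc : List (Option String)) (msg : List (String × String)) =>
      let d := PySem.Dict.ofList msg
      if d.get? "role" == some "user" && !(PySem.Str.startswith (d.getD "text" "") "A data e hora atuais são:")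
      then acc ++ [d.get? "text"] else acc) []
    match user_messages.getLast? with
    | some t? => "*Cliente:* " ++ (match t? with | some t => t | none => "None")
    | none => "Nenhum histórico de conversa encontrado."
  else PySem.Str.join "\n" relevant_summary

-- ===== PORT B =====
-- reverse pass collecting kept lines, breaking once max_messages lines are collected (Source B's first loop)
def pvPickRev : List (List (String × String)) → Int → List String → List String
  | [], _, picked => picked
  | message :: rest, mx, picked =>
    let d := PySem.Dict.ofList message
    let role := if d.get? "role" == some "user" then "Cliente" else "Bot"
    let text := PySem.Str.strip (d.getD "text" "")
    let drop := if role == "Cliente"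
      then PySem.Str.startswith text "A data e hora atuais são:"
      else (PySem.Str.startswith text "Entendido. A Regra de Ouro"
            || PySem.Str.startswith text "Chamando função:"
            || PySem.Str.startswith text "[HUMAN_INTERVENTION]")
    if drop then pvPickRev rest mx picked
    else
      let picked' := picked ++ ["*" ++ role ++ ":* " ++ text]
      if (picked'.length : Int) == mx then picked' else pvPickRev rest mx picked'

-- reverse early-return fallback scan (Source B's second loop)
def pvFallbackRev : List (List (String × String)) → String
  | [] => "Nenhum histórico de conversa encontrado."
  | message :: rest =>
    let d := PySem.Dict.ofList message
    if d.get? "role" == some "user" && !(PySem.Str.startswith (d.getD "text" "") "A data e hora atuais são:")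
    then "*Cliente:* " ++ (match d.get? "text" with | some t => t | none => "None")
    else pvFallbackRev rest

def get_last_messages_summary_alt (history : List (List (String × String))) (max_messages : Int) : String :=
  let picked := pvPickRev history.reverse max_messages []
  if picked.isEmpty then pvFallbackRev history.reverse
  else PySem.Str.join "\n" picked.reverse

-- ===== PRECONDITION & SPEC =====
-- Pre_ excludes negative max_messages, a limit no caller would pass: there A's slice
-- clean_history[-max_messages:] flips into a positive index and drops the OLDEST kept messages,
-- while B's natural reading of a negative limit is "no limit" — a corner where neither value is
-- canonical and both are defensible.
def Pre_get_last_messages_summary (history : List (List (String × String))) (max_messages : Int) : Prop :=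
  0 ≤ max_messages
instance (history : List (List (String × String))) (max_messages : Int) : Decidable (Pre_get_last_messages_summary history max_messages) := by unfold Pre_get_last_messages_summary; infer_instance

def pvWitness_get_last_messages_summary : (List (List (String × String))) × Int :=
  ([[("role", "user"), ("text", "hi")], [("role", "user"), ("text", "yo")]], 4)

def Spec_get_last_messages_summary (history : List (List (String × String))) (max_messages : Int) (out : String) : Prop := out = get_last_messages_summary_alt history max_messages
instance (history : List (List (String × String))) (max_messages : Int) (out : String) : Decidable (Spec_get_last_messages_summary history max_messages out) := by unfold Spec_get_last_messages_summary; infer_instance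

-- ===== CLAIM =====
def Claim_equal_get_last_messages_summary : Prop := ∀ (history : List (List (String × String))) (max_messages : Int), Dom_get_last_messages_summary history max_messages → Pre_get_last_messages_summary history max_messages → Spec_get_last_messages_summary history max_messages (get_last_messages_summary history max_messages)

-- ===== LEMMAS AND PROOFS =====

-- the shared filtering predicate, as an Option-producing helper (proof-side only)
def pvKeep (message : List (String × String)) : Option String :=
  let d := PySem.Dict.ofList message
  let role := if d.get? "role" == some "user" then "Cliente" else "Bot"
  let text := PySem.Str.strip (d.getD "text" "")
  if role == "Cliente" && PySem.Str.startswith text "A data e hora atuais são:" then none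
  else if role == "Bot" && PySem.Str.startswith text "Entendido. A Regra de Ouro" then none
  else if role == "Bot" && PySem.Str.startswith text "Chamando função:" then none
  else if role == "Bot" && PySem.Str.startswith text "[HUMAN_INTERVENTION]" then none
  else some ("*" ++ role ++ ":* " ++ text)

def pvUser (msg : List (String × String)) : Option (Option String) :=
  let d := PySem.Dict.ofList msg
  if d.get? "role" == some "user" && !(PySem.Str.startswith (d.getD "text" "") "A data e hora atuais são:")
  then some (d.get? "text") else none

lemma bodyA_eq :
    (fun (acc : List String) (message : List (String × String)) =>
      let d := PySem.Dict.ofList message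
      let role := if d.get? "role" == some "user" then "Cliente" else "Bot"
      let text := PySem.Str.strip (d.getD "text" "")
      if role == "Cliente" && PySem.Str.startswith text "A data e hora atuais são:" then acc
      else if role == "Bot" && PySem.Str.startswith text "Entendido. A Regra de Ouro" then acc
      else if role == "Bot" && PySem.Str.startswith text "Chamando função:" then acc
      else if role == "Bot" && PySem.Str.startswith text "[HUMAN_INTERVENTION]" then acc
      else acc ++ ["*" ++ role ++ ":* " ++ text]) =
    fun acc message => acc ++ (pvKeep message).toList := by
  funext acc message
  unfold pvKeep
  dsimp only
  split_ifs <;> simp only [Option.toList_none, Option.toList_some, List.append_nil]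

lemma bodyU_eq :
    (fun (acc : List (Option String)) (msg : List (String × String)) =>
      let d := PySem.Dict.ofList msg
      if d.get? "role" == some "user" && !(PySem.Str.startswith (d.getD "text" "") "A data e hora atuais são:")
      then acc ++ [d.get? "text"] else acc) =
    fun acc msg => acc ++ (pvUser msg).toList := by
  funext acc msg
  unfold pvUser
  dsimp only
  split_ifs <;> simp only [Option.toList_none, Option.toList_some, List.append_nil]

lemma foldl_toList_eq {α β : Type} (f : α → Option β) (l : List α) (acc : List β) :
    l.foldl (fun acc x => acc ++ (f x).toList) acc = acc ++ l.filterMap f := by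
  induction l generalizing acc with
  | nil => simp
  | cons x xs ih => cases hf : f x <;> simp [ih, hf]

lemma pickRev_cons (message : List (String × String)) (rest : List (List (String × String)))
    (mx : Int) (acc : List String) :
    pvPickRev (message :: rest) mx acc =
      match pvKeep message with
      | none => pvPickRev rest mx acc
      | some line =>
        if ((acc ++ [line]).length : Int) == mx then acc ++ [line]
        else pvPickRev rest mx (acc ++ [line]) := by
  simp only [pvPickRev]
  unfold pvKeep
  dsimp only
  by_cases hr : ((PySem.Dict.ofList message).get? "role" == some "user") = true
  · simp only [hr, if_true]
    have e1 : (("Cliente" : String) == "Cliente") = true := by decide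
    have e2 : (("Cliente" : String) == "Bot") = false := by decide
    simp only [e1, e2, Bool.true_and, Bool.false_and, Bool.false_eq_true, if_false]
    split_ifs <;> simp_all
  · rw [Bool.not_eq_true] at hr
    simp only [hr, Bool.false_eq_true, if_false]
    have e1 : (("Bot" : String) == "Cliente") = false := by decide
    have e2 : (("Bot" : String) == "Bot") = true := by decide
    simp only [e1, e2, Bool.true_and, Bool.false_and, Bool.false_eq_true, if_false]
    split_ifs <;> simp_all

lemma pickRev_all (l : List (List (String × String))) (mx : Int) (acc : List String)
    (h : mx ≤ 0) : pvPickRev l mx acc = acc ++ l.filterMap pvKeep := by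
  induction l generalizing acc with
  | nil => simp [pvPickRev]
  | cons m rest ih =>
    rw [pickRev_cons]
    cases hk : pvKeep m with
    | none => simp [ih, hk]
    | some line =>
      have hb : ¬ ((acc.length : Int) + 1 = mx) := by omega
      simp [ih, hk, List.append_assoc]
      intro hcontr
      exact absurd hcontr hb

lemma pickRev_take (l : List (List (String × String))) (mx : Int) (acc : List String)
    (h : (acc.length : Int) < mx) :
    pvPickRev l mx acc = acc ++ (l.filterMap pvKeep).take (mx - acc.length).toNat := by
  induction l generalizing acc with
  | nil => simp [pvPickRev]
  | cons m rest ih =>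
    rw [pickRev_cons]
    cases hk : pvKeep m with
    | none => simp [ih acc h, hk]
    | some line =>
      by_cases he : ((acc.length : Int) + 1 = mx)
      · have hmx : (mx - acc.length).toNat = 1 := by omega
        have he' : (((acc ++ [line]).length : Nat) : Int) = mx := by
          simp only [List.length_append, List.length_cons, List.length_nil]
          push_cast
          omega
        simp [he', hmx, hk]
        intro hcontr
        exact absurd he hcontr
      · have hlt : (((acc ++ [line]).length : Nat) : Int) < mx := by
          simp only [List.length_append, List.length_cons, List.length_nil]
          push_cast
          omega
        have hbeq : (((acc ++ [line]).length : Int) == mx) = false := by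
          simp only [beq_eq_false_iff_ne, ne_eq, List.length_append, List.length_cons,
            List.length_nil]
          push_cast
          omega
        simp only [hbeq, Bool.false_eq_true, if_false, ih _ hlt, List.filterMap_cons, hk]
        have h1 : (mx - acc.length).toNat = (mx - (acc ++ [line]).length).toNat + 1 := by
          simp only [List.length_append, List.length_cons, List.length_nil]
          push_cast
          omega
        simp [h1, List.take_succ_cons]

lemma fallbackRev_eq (l : List (List (String × String))) :
    pvFallbackRev l =
      match (l.filterMap pvUser).head? with
      | some t? => "*Cliente:* " ++ (match t? with | some t => t | none => "None")
      | none => "Nenhum histórico de conversa encontrado." := by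
  induction l with
  | nil => simp [pvFallbackRev]
  | cons m rest ih =>
    simp only [pvFallbackRev]
    rw [List.filterMap_cons]
    rw [show pvUser m = (if ((PySem.Dict.ofList m).get? "role" == some "user" &&
        !(PySem.Str.startswith ((PySem.Dict.ofList m).getD "text" "") "A data e hora atuais são:")) = true
        then some ((PySem.Dict.ofList m).get? "text") else none) from rfl]
    split_ifs with hc
    · simp only [List.head?_cons]
    · simpa using ih

-- ===== VERDICT =====
theorem get_last_messages_summary_spec : Claim_equal_get_last_messages_summary := by
  intro history mx _ hm
  unfold Pre_get_last_messages_summary at hm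
  unfold Spec_get_last_messages_summary
  unfold get_last_messages_summary get_last_messages_summary_alt
  simp only [bodyA_eq, bodyU_eq, foldl_toList_eq, List.nil_append]
  have hrev : (pvPickRev history.reverse mx []).reverse =
      PySem.List.slice (history.filterMap pvKeep) (some (-mx)) none := by
    rcases eq_or_lt_of_le hm with h0 | h1
    · rw [pickRev_all _ _ _ (le_of_eq h0.symm), ← h0]
      simp [List.filterMap_reverse, PySem.List.slice_zero_start, PySem.List.slice_none_none]
    · rw [pickRev_take _ _ _ (by simpa using h1)]
      have hn : mx = ((mx.toNat : Nat) : Int) := by omega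
      have hpos : 0 < mx.toNat := by omega
      rw [hn, PySem.List.slice_from_neg_natCast _ _ hpos]
      simp only [List.nil_append, List.filterMap_reverse, List.length_nil, Nat.cast_zero,
        sub_zero, Int.toNat_natCast]
      rw [List.take_reverse]
      simp
  have hempty : (pvPickRev history.reverse mx []).isEmpty =
      (PySem.List.slice (history.filterMap pvKeep) (some (-mx)) none).isEmpty := by
    rw [← hrev]
    simp
  rw [hempty, fallbackRev_eq, List.filterMap_reverse, List.head?_reverse]
  by_cases hE : (PySem.List.slice (history.filterMap pvKeep) (some (-mx)) none).isEmpty = true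
  · simp only [hE, if_true]
  · simp only [hE, Bool.false_eq_true, if_false]
    rw [hrev]
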